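-- pv_equiv track=rewrite | github.com/pypi-data/pypi-mirror-41 | packages/ngramtg/ngramtg-2019.1.tar.gz/ngramtg-2019.1/ngramtg/ngram.py | generate_word_frequency_map
-- ===== SOURCE A (Python) =====
-- def generate_word_frequency_map(ngrams=None):
--     """Returns a dictionary of dictionaries with counts of next words."""
--     word_frequencies = {}
--
--     for ngram in ngrams:
--         length = len(ngram) - 1
--
--         for pos in range(length):
--             this_token = ngram[pos]
--             next_token = ngram[pos + 1]
--
--             if this_token not in word_frequencies:
--                 word_frequencies[this_token] = {}
--
--             if next_token not in word_frequencies[this_token]: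
--                 word_frequencies[this_token][next_token] = 0
--             word_frequencies[this_token][next_token] += 1
--
--     return word_frequencies
-- ===== SOURCE B (Python) =====
-- def generate_word_frequency_map(ngrams=None):
--     """Returns a dictionary of dictionaries with counts of next words."""
--     # Pass 1: group every successor after each token, in encounter order.
--     successors = {}
--     for ngram in ngrams:
--         for this_token, next_token in zip(ngram, ngram[1:]):
--             successors.setdefault(this_token, []).append(next_token)
--     # Pass 2: count each distinct successor (first-occurrence order).
--     return {this_token: {next_token: nexts.count(next_token)
--                          for next_token in dict.fromkeys(nexts)}
--             for this_token, nexts in successors.items()}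
-- ===== Notes on version B (the rewrite author's own statement) =====
-- stated objective: alternative
-- what changed: B first collects, per token, the ordered list of its successors in one grouping pass over adjacent pairs (zip), then builds the nested count dicts in a second pass by deduplicating and counting each group, instead of A's single pass incrementing nested dict counters in place.
import Mathlib
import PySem

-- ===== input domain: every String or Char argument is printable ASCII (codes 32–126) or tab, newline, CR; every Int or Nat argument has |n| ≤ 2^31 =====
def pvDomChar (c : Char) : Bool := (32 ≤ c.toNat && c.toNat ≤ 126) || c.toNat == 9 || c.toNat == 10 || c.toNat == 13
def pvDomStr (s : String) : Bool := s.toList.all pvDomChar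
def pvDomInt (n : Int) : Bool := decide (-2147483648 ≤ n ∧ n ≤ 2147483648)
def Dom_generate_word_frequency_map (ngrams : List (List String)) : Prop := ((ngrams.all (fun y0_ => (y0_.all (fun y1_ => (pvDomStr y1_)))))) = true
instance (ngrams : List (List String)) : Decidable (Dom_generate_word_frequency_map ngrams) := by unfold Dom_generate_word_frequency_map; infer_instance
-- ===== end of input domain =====

-- B replaces A's single counter-incrementing pass by a grouping pass (token → ordered successor list)
-- followed by a dedup-and-count pass per group; objective: alternative structure, same results.

-- ===== PORT A =====
-- literal transliteration of A: nested loops incrementing nested dict counters in place.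
-- ngram[pos] and ngram[pos+1] are always in range (pos ∈ range(len-1)), so pyGetD's default "" is never used.
def generate_word_frequency_map (ngrams : List (List String)) : List (String × List (String × Int)) :=
  let word_frequencies : PySem.Dict String (PySem.Dict String Int) :=
    ngrams.foldl (fun word_frequencies ngram =>
      let length : Int := (ngram.length : Int) - 1
      (PySem.List.pyRange 0 length 1).foldl (fun word_frequencies pos =>
        let this_token := PySem.List.pyGetD ngram pos ""
        let next_token := PySem.List.pyGetD ngram (pos + 1) ""
        let word_frequencies :=
          if word_frequencies.contains this_token then word_frequencies
          else word_frequencies.insert this_token PySem.Dict.empty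
        let inner := word_frequencies.getD this_token PySem.Dict.empty
        let inner := if inner.contains next_token then inner else inner.insert next_token 0
        word_frequencies.insert this_token (inner.insert next_token (inner.getD next_token 0 + 1)))
        word_frequencies)
      PySem.Dict.empty
  word_frequencies.items.map (fun p => (p.1, p.2.items))

-- ===== PORT B =====
-- literal transliteration of Source B: grouping pass — successors.setdefault(t, []).append(n) is
-- setdefault followed by modify with default [] — then a comprehension deduplicating
-- (dict.fromkeys = PySem.List.dedup) and counting each group.
def generate_word_frequency_map_alt (ngrams : List (List String)) : List (String × List (String × Int)) :=
  let successors : PySem.Dict String (List String) :=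
    ngrams.foldl (fun successors ngram =>
      (ngram.zip (PySem.List.slice ngram (some 1) none)).foldl
        (fun successors p => (successors.setdefault p.1 []).modify p.1 [] (fun l => l ++ [p.2]))
        successors)
      PySem.Dict.empty
  successors.items.map (fun p =>
    (p.1, (PySem.List.dedup p.2).map (fun next_token => (next_token, (p.2.count next_token : Int)))))

-- ===== PRECONDITION & SPEC =====
def Spec_generate_word_frequency_map (ngrams : List (List String)) (out : List (String × List (String × Int))) : Prop := out = generate_word_frequency_map_alt ngrams
instance (ngrams : List (List String)) (out : List (String × List (String × Int))) : Decidable (Spec_generate_word_frequency_map ngrams out) := by unfold Spec_generate_word_frequency_map; infer_instance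

-- ===== CLAIM (what is proved, stated in full; the proofs are below) =====
def Claim_equal_generate_word_frequency_map : Prop := ∀ (ngrams : List (List String)), Dom_generate_word_frequency_map ngrams → Spec_generate_word_frequency_map ngrams (generate_word_frequency_map ngrams)

-- ===== LEMMAS AND PROOFS =====

def pvStepInner (inn : PySem.Dict String Int) (b : String) : PySem.Dict String Int :=
  let inn1 := if inn.contains b then inn else inn.insert b 0
  inn1.insert b (inn1.getD b 0 + 1)

lemma pv_stepInner_keys (inn : PySem.Dict String Int) (b : String) :
    (pvStepInner inn b).keys = PySem.Set.add inn.keys b := by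
  unfold pvStepInner PySem.Set.add
  by_cases h : inn.contains b
  · simp only [h, if_true]
    rw [PySem.Dict.keys_insert_of_contains _ _ h]
    simp [(PySem.Dict.contains_iff_mem_keys inn b).mp h]
  · have h' : inn.contains b = false := by simpa using h
    have hm : b ∉ inn.keys := fun hc => absurd ((PySem.Dict.contains_iff_mem_keys inn b).mpr hc) (by simp [h'])
    simp only [h', if_false, Bool.false_eq_true]
    rw [PySem.Dict.keys_insert_of_contains _ _ (PySem.Dict.contains_insert_self _ _ _)]
    rw [PySem.Dict.keys_insert_of_not_contains _ _ h']
    simp [hm]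

lemma pv_stepInner_getD (inn : PySem.Dict String Int) (b b' : String) :
    (pvStepInner inn b).getD b' 0 = if b' = b then inn.getD b' 0 + 1 else inn.getD b' 0 := by
  unfold pvStepInner
  by_cases h : inn.contains b
  · simp only [h, if_true]
    rw [PySem.Dict.getD_insert]
    by_cases hb : b' = b <;> simp [hb]
  · have h' : inn.contains b = false := by simpa using h
    simp only [h', if_false, Bool.false_eq_true]
    rw [PySem.Dict.getD_insert, PySem.Dict.getD_insert, PySem.Dict.getD_insert]
    by_cases hb : b' = b <;> simp [hb, PySem.Dict.getD_of_not_contains _ _ h']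

def pvStepA (d : PySem.Dict String (PySem.Dict String Int)) (p : String × String) :
    PySem.Dict String (PySem.Dict String Int) :=
  let d1 := if d.contains p.1 then d else d.insert p.1 PySem.Dict.empty
  d1.insert p.1 (pvStepInner (d1.getD p.1 PySem.Dict.empty) p.2)

lemma pv_stepA_keys (d : PySem.Dict String (PySem.Dict String Int)) (p : String × String) :
    (pvStepA d p).keys = PySem.Set.add d.keys p.1 := by
  unfold pvStepA PySem.Set.add
  by_cases h : d.contains p.1
  · simp only [h, if_true]
    rw [PySem.Dict.keys_insert_of_contains _ _ h]
    simp [(PySem.Dict.contains_iff_mem_keys d p.1).mp h]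
  · have h' : d.contains p.1 = false := by simpa using h
    have hm : p.1 ∉ d.keys := fun hc => absurd ((PySem.Dict.contains_iff_mem_keys d p.1).mpr hc) (by simp [h'])
    simp only [h', if_false, Bool.false_eq_true]
    rw [PySem.Dict.keys_insert_of_contains _ _ (PySem.Dict.contains_insert_self _ _ _)]
    rw [PySem.Dict.keys_insert_of_not_contains _ _ h']
    simp [hm]

lemma pv_stepA_getD (d : PySem.Dict String (PySem.Dict String Int)) (p : String × String) (a : String) :
    (pvStepA d p).getD a PySem.Dict.empty =
      if a = p.1 then pvStepInner (d.getD p.1 PySem.Dict.empty) p.2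
      else d.getD a PySem.Dict.empty := by
  unfold pvStepA
  by_cases h : d.contains p.1
  · simp only [h, if_true]
    rw [PySem.Dict.getD_insert]
  · have h' : d.contains p.1 = false := by simpa using h
    simp only [h', if_false, Bool.false_eq_true]
    rw [PySem.Dict.getD_insert, PySem.Dict.getD_insert]
    by_cases ha : a = p.1
    · simp [ha, PySem.Dict.getD_of_not_contains _ _ h']
    · rw [PySem.Dict.getD_insert]
      simp [ha]

lemma pv_foldA_keys (ps : List (String × String)) (d : PySem.Dict String (PySem.Dict String Int)) :
    (ps.foldl pvStepA d).keys = PySem.Set.update d.keys (ps.map (·.1)) := by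
  induction ps generalizing d with
  | nil => rfl
  | cons p ps ih =>
    simp only [List.foldl_cons, List.map_cons]
    rw [ih, pv_stepA_keys]
    rfl

lemma pv_foldA_inner_keys (ps : List (String × String)) (d : PySem.Dict String (PySem.Dict String Int)) (a : String) :
    ((ps.foldl pvStepA d).getD a PySem.Dict.empty).keys =
      PySem.Set.update ((d.getD a PySem.Dict.empty).keys) ((ps.filter (fun p => p.1 == a)).map (·.2)) := by
  induction ps generalizing d with
  | nil => rfl
  | cons p ps ih =>
    simp only [List.foldl_cons, List.filter_cons]
    rw [ih, pv_stepA_getD]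
    by_cases h : a = p.1
    · simp only [h, beq_self_eq_true, if_pos, List.map_cons]
      rw [pv_stepInner_keys]
      rfl
    · have hb : (p.1 == a) = false := by simpa using fun e => h e.symm
      simp [h, hb]

lemma pv_foldA_count (ps : List (String × String)) (d : PySem.Dict String (PySem.Dict String Int)) (a b : String) :
    ((ps.foldl pvStepA d).getD a PySem.Dict.empty).getD b 0 =
      (d.getD a PySem.Dict.empty).getD b 0 + (ps.count (a, b) : Int) := by
  induction ps generalizing d with
  | nil => simp
  | cons p ps ih =>
    simp only [List.foldl_cons, List.count_cons]
    rw [ih, pv_stepA_getD]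
    by_cases h : a = p.1
    · simp only [h, if_true]
      rw [pv_stepInner_getD]
      by_cases hb : b = p.2
      · simp [hb]
        ring
      · simp [hb]
        exact fun e => hb (congrArg Prod.snd e).symm
    · have : (p == (a, b)) = false := beq_eq_false_iff_ne.mpr (fun e => h (by simp [e]))
      simp [h, this]

lemma pv_count_group (ps : List (String × String)) (a b : String) :
    ((ps.filter (fun p => p.1 == a)).map (·.2)).count b = ps.count (a, b) := by
  induction ps with
  | nil => rfl
  | cons p ps ih =>
    simp only [List.filter_cons, List.count_cons]
    by_cases h1 : p.1 = a
    · by_cases h2 : p.2 = b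
      · have : (p == (a, b)) = true := by simp [Prod.ext_iff, h1, h2]
        simp [h1, h2, this, ih]
      · have : (p == (a, b)) = false := beq_eq_false_iff_ne.mpr (fun e => h2 (by simp [e]))
        simp [h1, h2, this, ih]
    · have : (p == (a, b)) = false := beq_eq_false_iff_ne.mpr (fun e => h1 (by simp [e]))
      simp [h1, this, ih]

lemma pv_zip_eq (g : List String) :
    (PySem.List.pyRange 0 ((g.length : Int) - 1) 1).map
      (fun pos => (PySem.List.pyGetD g pos "", PySem.List.pyGetD g (pos + 1) "")) =
    g.zip (g.drop 1) := by
  cases g with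
  | nil => rfl
  | cons x xs =>
    have hlen : ((x :: xs).length : Int) - 1 = ((xs.length : Nat) : Int) := by
      push_cast [List.length_cons]; ring
    rw [hlen, PySem.List.pyRange_zero_natCast, List.map_map]
    apply List.ext_getElem
    · simp
    · intro i h1 h2
      simp only [List.getElem_map, List.getElem_range, Function.comp_apply]
      have hi : i < xs.length := by simpa using h1
      have hcast : ((i : Int) + 1) = ((i + 1 : Nat) : Int) := by push_cast; ring
      rw [hcast, PySem.List.pyGetD_natCast, PySem.List.pyGetD_natCast]
      rw [List.getElem_zip]
      have e1 : (x :: xs).getD i "" = (x :: xs)[i]'(by simpa using Nat.lt_succ_of_lt hi) :=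
        List.getD_eq_getElem _ _ _
      have e2 : (x :: xs).getD (i + 1) "" = (x :: xs)[i + 1]'(by simpa using Nat.succ_lt_succ hi) :=
        List.getD_eq_getElem _ _ _
      rw [e1, e2]
      simp

def pvPairs (ngrams : List (List String)) : List (String × String) :=
  ngrams.flatMap (fun g => g.zip (g.drop 1))

def pvStepB (d : PySem.Dict String (List String)) (p : String × String) :
    PySem.Dict String (List String) :=
  d.modify p.1 [] (fun l => l ++ [p.2])

lemma pv_A_flat (ngrams : List (List String)) :
    generate_word_frequency_map ngrams =
      ((pvPairs ngrams).foldl pvStepA PySem.Dict.empty).items.map (fun p => (p.1, p.2.items)) := by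
  unfold generate_word_frequency_map pvPairs
  rw [List.foldl_flatMap]
  have h : ∀ (g : List String) (wf : PySem.Dict String (PySem.Dict String Int)),
      (PySem.List.pyRange 0 ((g.length : Int) - 1) 1).foldl (fun word_frequencies pos =>
        let this_token := PySem.List.pyGetD g pos ""
        let next_token := PySem.List.pyGetD g (pos + 1) ""
        let word_frequencies :=
          if word_frequencies.contains this_token then word_frequencies
          else word_frequencies.insert this_token PySem.Dict.empty
        let inner := word_frequencies.getD this_token PySem.Dict.empty
        let inner := if inner.contains next_token then inner else inner.insert next_token 0
        word_frequencies.insert this_token (inner.insert next_token (inner.getD next_token 0 + 1)))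
        wf
      = (g.zip (g.drop 1)).foldl pvStepA wf := by
    intro g wf
    conv_rhs => rw [← pv_zip_eq g]
    rw [List.foldl_map]
    rfl
  simp only [h]

lemma pv_setdefault_modify (d : PySem.Dict String (List String)) (k : String) (b : String) :
    (d.setdefault k []).modify k [] (fun l => l ++ [b]) = d.modify k [] (fun l => l ++ [b]) := by
  by_cases h : d.contains k
  · rw [PySem.Dict.setdefault_of_contains _ _ h]
  · have h' : d.contains k = false := by simpa using h
    rw [PySem.Dict.setdefault_of_not_contains _ _ h']
    unfold PySem.Dict.modify
    rw [PySem.Dict.getD_insert_self, PySem.Dict.insert_insert_self,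
      PySem.Dict.getD_of_not_contains _ _ h']

lemma pv_B_flat (ngrams : List (List String)) :
    generate_word_frequency_map_alt ngrams =
      ((pvPairs ngrams).foldl pvStepB PySem.Dict.empty).items.map (fun p =>
        (p.1, (PySem.List.dedup p.2).map (fun b => (b, (p.2.count b : Int))))) := by
  unfold generate_word_frequency_map_alt pvPairs
  rw [List.foldl_flatMap]
  have hs : ∀ (g : List String), PySem.List.slice g (some 1) none = g.drop 1 := by
    intro g
    simpa using PySem.List.slice_from g (a := 1) (by norm_num)
  simp only [hs, pv_setdefault_modify]
  rfl

lemma pv_main (ngrams : List (List String)) :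
    generate_word_frequency_map ngrams = generate_word_frequency_map_alt ngrams := by
  rw [pv_A_flat, pv_B_flat]
  set P := pvPairs ngrams with hP
  set W := P.foldl pvStepA PySem.Dict.empty with hW
  set S := P.foldl pvStepB PySem.Dict.empty with hS
  have hkW : W.keys = PySem.Set.ofList (P.map (·.1)) := by
    rw [hW, pv_foldA_keys, PySem.Set.ofList_eq_foldl]
    rfl
  have hkS : S.keys = PySem.Set.ofList (P.map (·.1)) := by
    rw [hS]
    show (P.foldl (fun d p => d.modify p.1 [] (fun l => l ++ [p.2])) PySem.Dict.empty).keys = _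
    rw [PySem.Dict.keys_foldl_modify_key P (fun p => p.1) [] (fun _ p => fun l => l ++ [p.2]),
      PySem.Set.ofList_eq_foldl]
    rfl
  have hnodW : W.keys.Nodup := by rw [hkW]; exact PySem.Set.nodup_ofList _
  have hnodS : S.keys.Nodup := by rw [hkS]; exact PySem.Set.nodup_ofList _
  rw [PySem.Dict.items_eq_map_keys W hnodW PySem.Dict.empty,
    PySem.Dict.items_eq_map_keys S hnodS ([] : List String),
    List.map_map, List.map_map, hkW, hkS]
  apply List.map_congr_left
  intro a _
  simp only [Function.comp_apply]
  have hbsa : S.getD a [] = (P.filter (fun p => p.1 == a)).map (·.2) := by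
    rw [hS]
    show (P.foldl (fun d p => d.modify p.1 [] (fun l => l ++ [p.2])) PySem.Dict.empty).getD a [] = _
    rw [PySem.Dict.getD_foldl_modify_append]
    simp [PySem.Dict.getD_empty]
  set bsa := (P.filter (fun p => p.1 == a)).map (·.2) with hbsadef
  have hinnk : (W.getD a PySem.Dict.empty).keys = PySem.Set.ofList bsa := by
    rw [hW, pv_foldA_inner_keys]
    simp only [PySem.Dict.getD_empty, PySem.Dict.keys_empty]
    rw [PySem.Set.ofList_eq_foldl]
    rfl
  have hinnnod : (W.getD a PySem.Dict.empty).keys.Nodup := by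
    rw [hinnk]; exact PySem.Set.nodup_ofList _
  rw [PySem.Dict.items_eq_map_keys _ hinnnod (0 : Int), hinnk, hbsa,
    PySem.List.dedup_eq_ofList]
  congr 1
  apply List.map_congr_left
  intro b _
  have hcnt : (W.getD a PySem.Dict.empty).getD b 0 = (P.count (a, b) : Int) := by
    rw [hW, pv_foldA_count]
    simp [PySem.Dict.getD_empty]
  rw [hcnt, hbsadef, pv_count_group]

-- ===== VERDICT (by name: the statement is the Claim_ definition above) =====
theorem generate_word_frequency_map_spec : Claim_equal_generate_word_frequency_map := by
  intro ngrams _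
  unfold Spec_generate_word_frequency_map
  exact pv_main ngrams
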